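-- pv_equiv track=rewrite | github.com/cegx-ds/couplet | couplet/trim.py | get_right_trimming_point
-- ===== SOURCE A (Python) =====
-- def get_right_trimming_point(mismatches, read_length):
--
--     """Function to identify a right trimming point for removing
--     trailing mismatches.
--
--     Given a list of mismatches and a read length, this function identifies a
--     trimming point, where if the read was trimmed from the right, this would
--     result in the removal of trailing mismatches.
--
--     Args:
--         mismatches: A list of mismatch indices, i.e. the location of mismatches
--             in the read. This list is zero based
--         read_length: The length of the read to be trimmed.
--
--     Returns:
--         The right trimming point. For example, a read "ACGTNACGTNN" with
--         read_length=11 and mismatches=[4,9,10] would result in a right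
--         trimming point of 9. The trimming point can be zero (but only in
--         exceptional circumstances where all bases in the read are mismatches).
--
--     """
--
--     # Start with right_trim = read_length, then reverse through mismatches and
--     # decrease right_trim as long as there is a succession of mismatches.
--     right_trim = read_length
--     for i in range(len(mismatches)):
--         pos = mismatches[-(i + 1)]
--         if pos < (read_length - i - 1):
--             break
--         else:
--             right_trim = pos
--
--     return right_trim
-- ===== SOURCE B (Python) =====
-- def get_right_trimming_point(mismatches, read_length):
--     # Single forward pass: record the last index j whose entry breaks the
--     # trailing-run condition (mismatches[j] - j < read_length - n); the
--     # trimming point is the entry just after it (or read_length if none left).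
--     n = len(mismatches)
--     d = read_length - n
--     t = -1
--     for j, pos in enumerate(mismatches):
--         if pos - j < d:
--             t = j
--     if t == n - 1:
--         return read_length
--     return mismatches[t + 1]
-- ===== Notes on version B (the rewrite author's own statement) =====
-- stated objective: alternative
-- what changed: Replaces A's backward scan with early break over negative indices by a single forward pass that records the last index violating the trailing-run condition mismatches[j]-j < read_length-n and reads the answer off directly after it.
import Mathlib
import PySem

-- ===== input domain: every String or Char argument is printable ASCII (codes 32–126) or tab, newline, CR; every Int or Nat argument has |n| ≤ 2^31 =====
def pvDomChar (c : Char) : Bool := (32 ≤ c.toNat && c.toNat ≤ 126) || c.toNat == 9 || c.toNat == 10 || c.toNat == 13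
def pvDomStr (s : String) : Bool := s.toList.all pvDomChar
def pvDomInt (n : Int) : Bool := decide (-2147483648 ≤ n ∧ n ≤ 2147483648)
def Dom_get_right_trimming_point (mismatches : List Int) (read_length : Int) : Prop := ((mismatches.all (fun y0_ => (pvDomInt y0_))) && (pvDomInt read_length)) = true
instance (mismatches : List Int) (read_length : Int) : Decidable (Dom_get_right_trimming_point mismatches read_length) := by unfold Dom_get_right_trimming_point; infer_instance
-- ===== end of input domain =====

-- B replaces A's backward scan-with-break by a single forward pass that records the
-- last index violating the trailing-run condition; an alternative of the same cost class.

-- ===== PORT A =====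
-- A's loop: for i in range(len(mismatches)): pos = mismatches[-(i+1)]; break / right_trim = pos
def grtpA_loop (ms : List Int) (rl : Int) : List Nat → Int → Int
  | [], rt => rt
  | i :: rest, rt =>
    match PySem.List.pyGet? ms (-((i : Int) + 1)) with
    | none => rt   -- unreachable: i < ms.length, so the negative index is in range
    | some pos => if pos < rl - (i : Int) - 1 then rt else grtpA_loop ms rl rest pos

def get_right_trimming_point (mismatches : List Int) (read_length : Int) : Int :=
  grtpA_loop mismatches read_length (List.range mismatches.length) read_length

-- ===== PORT B =====
-- Source B's forward loop: last index j with mismatches[j] - j < d, or -1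
def grtpB_t (ms : List Int) (d : Int) : Int :=
  (PySem.List.enumerate ms 0).foldl (fun t p => if p.2 - p.1 < d then p.1 else t) (-1)

def get_right_trimming_point_alt (mismatches : List Int) (read_length : Int) : Int :=
  let n : Int := mismatches.length
  let d : Int := read_length - n
  let t : Int := grtpB_t mismatches d
  if t = n - 1 then read_length
  else (PySem.List.pyGet? mismatches (t + 1)).getD 0   -- always in range: -1 ≤ t < n - 1

-- ===== PRECONDITION & SPEC =====
def Spec_get_right_trimming_point (mismatches : List Int) (read_length : Int) (out : Int) : Prop := out = get_right_trimming_point_alt mismatches read_length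
instance (mismatches : List Int) (read_length : Int) (out : Int) : Decidable (Spec_get_right_trimming_point mismatches read_length out) := by unfold Spec_get_right_trimming_point; infer_instance

-- ===== CLAIM (what is proved, stated in full; the proofs are below) =====
def Claim_equal_get_right_trimming_point : Prop := ∀ (mismatches : List Int) (read_length : Int), Dom_get_right_trimming_point mismatches read_length → Spec_get_right_trimming_point mismatches read_length (get_right_trimming_point mismatches read_length)

-- ===== LEMMAS AND PROOFS =====

-- Common right-to-left specification both ports are reduced to
def grtpS : List Int → Int → Int → Int
  | [], _, r => r
  | x :: rest, rl, r => if x < rl - 1 then r else grtpS rest (rl - 1) x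

-- generalisation of B's port with an arbitrary value r in place of read_length as result of the 't = n-1' branch
def grtpBg (ms : List Int) (rl r : Int) : Int :=
  let n : Int := ms.length
  let t : Int := grtpB_t ms (rl - n)
  if t = n - 1 then r
  else (PySem.List.pyGet? ms (t + 1)).getD 0

theorem pyGet?_neg_shift (ys : List Int) (x : Int) (i : Nat) :
    PySem.List.pyGet? (ys ++ [x]) (-((i : Int) + 1) - 1) = PySem.List.pyGet? ys (-((i : Int) + 1)) := by
  by_cases h : i < ys.length
  · have e1 : (-((i:Int)+1) - 1) = -(((i+2 : Nat)):Int) := by push_cast; ring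
    have e2 : (-((i:Int)+1)) = -(((i+1:Nat)):Int) := by push_cast; ring
    rw [e1, e2, PySem.List.pyGet?_neg_natCast (ys ++ [x]) (i+2) (by omega)
          (by simp only [List.length_append, List.length_singleton]; omega),
        PySem.List.pyGet?_neg_natCast ys (i+1) (by omega) (by omega)]
    simp only [List.length_append, List.length_singleton]
    rw [show ys.length + 1 - (i + 2) = ys.length - (i + 1) by omega,
        List.getElem?_append_left (by omega)]
  · rw [(PySem.List.pyGet?_eq_none_iff _ _).mpr
          (by simp only [PySem.Raise.InRange, List.length_append, List.length_singleton, not_and, not_lt]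
              push_cast
              omega),
        (PySem.List.pyGet?_eq_none_iff _ _).mpr
          (by simp only [PySem.Raise.InRange, not_and, not_lt]
              push_cast
              omega)]

theorem grtpA_loop_shift (ys : List Int) (x rl r : Int) (l : List Nat) :
    grtpA_loop (ys ++ [x]) rl (l.map Nat.succ) r = grtpA_loop ys (rl - 1) l r := by
  induction l generalizing r with
  | nil => rfl
  | cons i rest ih =>
    simp only [List.map_cons, grtpA_loop]
    have hg : PySem.List.pyGet? (ys ++ [x]) (-((i.succ : Int) + 1)) = PySem.List.pyGet? ys (-((i : Int) + 1)) := by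
      have e : (-((i.succ : Int) + 1)) = (-((i : Int) + 1) - 1) := by push_cast; ring
      rw [e, pyGet?_neg_shift]
    rw [hg]
    cases PySem.List.pyGet? ys (-((i : Int) + 1)) with
    | none => rfl
    | some pos =>
      have e3 : rl - (i.succ : Int) - 1 = rl - 1 - (i : Int) - 1 := by push_cast; ring
      simp only [e3]
      by_cases hc : pos < rl - 1 - (i : Int) - 1
      · simp [hc]
      · simp only [hc, if_false]
        exact ih pos

theorem A_eq_S (ms : List Int) (rl r : Int) :
    grtpA_loop ms rl (List.range ms.length) r = grtpS ms.reverse rl r := by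
  induction ms using List.reverseRecOn generalizing rl r with
  | nil => rfl
  | append_singleton ys x ih =>
    rw [List.length_append, List.length_singleton, List.range_succ_eq_map]
    simp only [grtpA_loop]
    rw [show (-(((0:Nat):Int) + 1)) = (-1 : Int) by norm_num,
        PySem.List.pyGet?_neg_one_append_singleton]
    rw [List.reverse_append, List.reverse_singleton, List.singleton_append]
    simp only [grtpS, Nat.cast_zero, sub_zero]
    by_cases hc : x < rl - 1
    · simp [hc]
    · simp only [hc, if_false]
      rw [grtpA_loop_shift, ih]

theorem foldl_last_mem (l : List (Int × Int)) (d t0 : Int) :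
    (l.foldl (fun t p => if p.2 - p.1 < d then p.1 else t) t0 = t0) ∨
    (∃ p ∈ l, l.foldl (fun t p => if p.2 - p.1 < d then p.1 else t) t0 = p.1) := by
  induction l generalizing t0 with
  | nil => left; rfl
  | cons q rest ih =>
    simp only [List.foldl_cons]
    rcases ih (if q.2 - q.1 < d then q.1 else t0) with h | ⟨p, hp, h⟩
    · by_cases hq : q.2 - q.1 < d
      · right; exact ⟨q, List.mem_cons_self, by rw [h, if_pos hq]⟩
      · left; rw [h, if_neg hq]
    · right; exact ⟨p, List.mem_cons_of_mem _ hp, h⟩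

theorem grtpB_t_bounds (ms : List Int) (d : Int) :
    -1 ≤ grtpB_t ms d ∧ grtpB_t ms d < (ms.length : Int) := by
  unfold grtpB_t
  rcases foldl_last_mem (PySem.List.enumerate ms 0) d (-1) with h | ⟨p, hp, h⟩
  · rw [h]; omega
  · rw [h]
    rw [PySem.List.mem_enumerate_iff] at hp
    obtain ⟨k, hk, rfl⟩ := hp
    simp only [zero_add]
    omega

theorem B_eq_S (ms : List Int) (rl r : Int) :
    grtpBg ms rl r = grtpS ms.reverse rl r := by
  induction ms using List.reverseRecOn generalizing rl r with
  | nil => simp [grtpBg, grtpB_t, PySem.List.enumerate, grtpS]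
  | append_singleton ys x ih =>
    have hm : (PySem.List.enumerate (ys ++ [x]) 0) =
        PySem.List.enumerate ys 0 ++ [((ys.length : Int), x)] := by
      rw [PySem.List.enumerate_append]
      simp [PySem.List.enumerate]
    have hbd := grtpB_t_bounds ys (rl - 1 - (ys.length : Int))
    have hd : rl - ((ys ++ [x]).length : Int) = rl - 1 - (ys.length : Int) := by
      simp; ring
    have ht : grtpB_t (ys ++ [x]) (rl - ((ys ++ [x]).length : Int)) =
        (if x - (ys.length : Int) < rl - 1 - (ys.length : Int) then (ys.length : Int)
         else grtpB_t ys (rl - 1 - (ys.length : Int))) := by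
      rw [hd]; unfold grtpB_t; rw [hm, List.foldl_append]; rfl
    rw [List.reverse_append, List.reverse_singleton, List.singleton_append]
    simp only [grtpS]
    by_cases hc : x < rl - 1
    · have hxc : x - (ys.length : Int) < rl - 1 - (ys.length : Int) := by omega
      simp only [grtpBg, ht, if_pos hxc, if_pos hc]
      rw [if_pos (by simp)]
    · have hxc : ¬ (x - (ys.length : Int) < rl - 1 - (ys.length : Int)) := by omega
      rw [if_neg hc, ← ih (rl - 1) x]
      simp only [grtpBg, ht, if_neg hxc]
      rw [if_neg (by simp; omega)]
      by_cases he : grtpB_t ys (rl - 1 - (ys.length : Int)) = (ys.length : Int) - 1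
      · rw [if_pos he, he]
        rw [show (ys.length : Int) - 1 + 1 = (ys.length : Int) by ring]
        rw [show (ys ++ [x]) = ys ++ x :: [] from rfl, PySem.List.pyGet?_append_length]
        rfl
      · rw [if_neg he]
        set t := grtpB_t ys (rl - 1 - (ys.length : Int)) with hts
        rw [PySem.List.pyGet?_of_nonneg (ys ++ [x]) (by omega),
            PySem.List.pyGet?_of_nonneg ys (by omega),
            List.getElem?_append_left (by omega)]

-- ===== VERDICT (by name: the statement is the Claim_ definition above) =====
theorem get_right_trimming_point_spec : Claim_equal_get_right_trimming_point := by
  intro ms rl _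
  show get_right_trimming_point ms rl = get_right_trimming_point_alt ms rl
  have h1 : get_right_trimming_point ms rl = grtpS ms.reverse rl rl := A_eq_S ms rl rl
  have h2 : grtpBg ms rl rl = grtpS ms.reverse rl rl := B_eq_S ms rl rl
  rw [h1, ← h2]
  rfl
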